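-- pv_equiv track=rewrite | github.com/shijun18/PAAL-MedSeg | strategy/ap_strategy.py | pollsampling
-- ===== SOURCE A (Python) =====
-- def pollsampling(cluster_dict,sample_nums):
--     sample_list = []
--     keys = list(cluster_dict.keys())
--     count = 0
--     while len(sample_list) < sample_nums:
--         key = keys[int(count % len(keys))]
--         if len(cluster_dict[key]) != 0:
--             sample_list.append(cluster_dict[key].pop())
--         count += 1
--     return sample_list
-- ===== SOURCE B (Python) =====
-- # Return-value equivalent rewrite: closed-form round-by-round comprehension
-- # (A mutates cluster_dict's lists in place; B does not — equivalence is about the return value).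
-- def pollsampling(cluster_dict, sample_nums):
--     vals = list(cluster_dict.values())
--     rounds = max((len(v) for v in vals), default=0)
--     flat = [v[-1 - r] for r in range(rounds) for v in vals if len(v) > r]
--     return flat[:max(sample_nums, 0)]
-- ===== Notes on version B (the rewrite author's own statement) =====
-- stated objective: simpler
-- what changed: A's stateful while-loop that round-robins a cycling counter over the keys and destructively pops from the dict's lists is replaced by a closed-form comprehension: compute the round-by-round transpose (round r takes v[-1-r] from every cluster with more than r elements, in key order) and slice off the first sample_nums items; no mutation, no counter, no modulo indexing.
import Mathlib
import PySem

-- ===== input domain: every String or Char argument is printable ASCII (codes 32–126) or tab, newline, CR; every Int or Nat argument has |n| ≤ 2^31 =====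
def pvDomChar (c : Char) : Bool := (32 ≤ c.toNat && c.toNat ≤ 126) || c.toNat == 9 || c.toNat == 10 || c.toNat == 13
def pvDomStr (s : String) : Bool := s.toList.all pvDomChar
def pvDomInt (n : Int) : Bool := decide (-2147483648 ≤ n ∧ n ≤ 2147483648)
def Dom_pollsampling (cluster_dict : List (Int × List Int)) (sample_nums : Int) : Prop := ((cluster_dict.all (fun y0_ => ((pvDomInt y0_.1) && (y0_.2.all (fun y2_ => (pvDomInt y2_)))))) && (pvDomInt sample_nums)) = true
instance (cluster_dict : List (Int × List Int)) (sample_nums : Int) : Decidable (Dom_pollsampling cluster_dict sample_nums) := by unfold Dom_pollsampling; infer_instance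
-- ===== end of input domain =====

-- B replaces A's stateful round-robin while-loop (cycling counter, destructive pops) by a closed-form
-- round-by-round comprehension sliced to the quota; A mutates the dict's lists in place, B does not —
-- the equivalence proved here is about the return value only.

-- ===== PORT A =====
-- the while-loop of A; fuel only totalizes it (under Pre_ the loop finishes within the fuel given below)
def pollsamplingLoop (n : Int) (keys : List Int) : Nat → PySem.Dict Int (List Int) → List Int → Nat → List Int
  | 0, _, sample_list, _ => sample_list                 -- fuel exhausted: unreachable under Pre_ (A loops forever outside it)
  | fuel + 1, cluster_dict, sample_list, count =>
    if (sample_list.length : Int) < n then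
      if keys.isEmpty then sample_list                  -- Python: count % len(keys) raises ZeroDivisionError; outside Pre_
      else
        -- keys[int(count % len(keys))]: count ≥ 0 and the index is in range, so getD is exact
        let key := keys.getD (count % keys.length) 0
        -- cluster_dict[key]: key comes from keys, so it is present (no KeyError) and getD is exact
        let l := cluster_dict.getD key []
        if l.length ≠ 0 then
          match PySem.List.pop? l with
          | some (x, l') =>
            pollsamplingLoop n keys fuel (cluster_dict.insert key l') (sample_list ++ [x]) (count + 1)
          | none => sample_list                         -- unreachable: l ≠ [] so pop? = some _
        else
          pollsamplingLoop n keys fuel cluster_dict sample_list (count + 1)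
    else sample_list

def pollsampling (cluster_dict : List (Int × List Int)) (sample_nums : Int) : List Int :=
  let d := PySem.Dict.ofList cluster_dict
  let keys := d.keys
  pollsamplingLoop sample_nums keys ((keys.length + 1) * (sample_nums.toNat + 1)) d [] 0

-- ===== PORT B =====
def pollsampling_alt (cluster_dict : List (Int × List Int)) (sample_nums : Int) : List Int :=
  let vals := (PySem.Dict.ofList cluster_dict).values
  let rounds := PySem.List.maxD (vals.map (fun v => PySem.List.len v)) id 0
  -- the comprehension's guard len(v) > r puts -1 - r in range, so pyGet? is always `some` here and
  -- filterMap keeps exactly the guarded items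
  let flat := (PySem.List.pyRange 0 rounds).flatMap
      (fun r => vals.filterMap (fun v => if r < PySem.List.len v then PySem.List.pyGet? v (-1 - r) else none))
  PySem.List.slice flat none (some (max sample_nums 0))

-- ===== PRECONDITION & SPEC =====
-- Pre_ is exactly where A returns: beyond the dict's total element count the while-loop never fills the
-- quota (A loops forever), and with no keys and a positive quota `count % len(keys)` raises ZeroDivisionError.
def Pre_pollsampling (cluster_dict : List (Int × List Int)) (sample_nums : Int) : Prop :=
  sample_nums ≤ (((PySem.Dict.ofList cluster_dict).values).map (fun v => (v.length : Int))).sum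
    ∧ (0 < sample_nums → cluster_dict ≠ [])
instance (cluster_dict : List (Int × List Int)) (sample_nums : Int) : Decidable (Pre_pollsampling cluster_dict sample_nums) := by unfold Pre_pollsampling; infer_instance
def pvWitness_pollsampling : (List (Int × List Int)) × Int := ([(0, [1, 2]), (1, [3])], 2)

def Spec_pollsampling (cluster_dict : List (Int × List Int)) (sample_nums : Int) (out : List Int) : Prop := out = pollsampling_alt cluster_dict sample_nums
instance (cluster_dict : List (Int × List Int)) (sample_nums : Int) (out : List Int) : Decidable (Spec_pollsampling cluster_dict sample_nums out) := by unfold Spec_pollsampling; infer_instance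

-- ===== CLAIM (what is proved, stated in full; the proofs are below) =====
def Claim_equal_pollsampling : Prop := ∀ (cluster_dict : List (Int × List Int)) (sample_nums : Int), Dom_pollsampling cluster_dict sample_nums → Pre_pollsampling cluster_dict sample_nums → Spec_pollsampling cluster_dict sample_nums (pollsampling cluster_dict sample_nums)
-- ===== LEMMAS AND PROOFS =====

-- the last element of a nonempty list, as picked by one pop of A and by B's v[-1 - r]
def pvLast (v : List Int) : Int := v.getD (v.length - 1) 0
-- the elements one full round of A picks (last element of every nonempty cluster, in key order)
def pvPicksV (vals : List (List Int)) : List Int :=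
  vals.filterMap (fun v => if v.length = 0 then none else some (pvLast v))
def pvPopV (vals : List (List Int)) : List (List Int) := vals.map List.dropLast
def pvTot (vals : List (List Int)) : Nat := (vals.map List.length).sum

lemma pvTot_pop (vals : List (List Int)) :
    pvTot (pvPopV vals) + (pvPicksV vals).length = pvTot vals := by
  induction vals with
  | nil => rfl
  | cons v vs ih =>
    simp only [pvTot, pvPopV, pvPicksV, List.map_cons, List.sum_cons, List.filterMap_cons] at ih ⊢
    by_cases h : v.length = 0
    · simp only [if_pos h, List.length_dropLast]
      omega
    · simp only [if_neg h, List.length_dropLast, List.length_cons]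
      omega

lemma pvPicks_len_pos (vals : List (List Int)) (h : pvTot vals ≠ 0) :
    0 < (pvPicksV vals).length := by
  induction vals with
  | nil => simp [pvTot] at h
  | cons v vs ih =>
    simp only [pvTot, List.map_cons, List.sum_cons] at h
    by_cases hv : v.length = 0
    · have hvs : pvTot vs ≠ 0 := by simp only [pvTot]; omega
      have := ih hvs
      simp only [pvPicksV, List.filterMap_cons] at this ⊢
      rw [if_pos hv]
      exact this
    · simp only [pvPicksV, List.filterMap_cons]
      rw [if_neg hv]
      simp

-- the full stream of elements A's round-robin produces (and B's comprehension lists)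
def pvRounds (vals : List (List Int)) : List Int :=
  if h : pvTot vals = 0 then [] else pvPicksV vals ++ pvRounds (pvPopV vals)
termination_by pvTot vals
decreasing_by
  have h1 := pvTot_pop vals
  have h2 := pvPicks_len_pos vals h
  omega

lemma pvLoop_of_ge (n : Int) (keys : List Int) (fuel : Nat) (d : PySem.Dict Int (List Int))
    (out : List Int) (count : Nat) (h : n ≤ (out.length : Int)) :
    pollsamplingLoop n keys fuel d out count = out := by
  cases fuel <;> simp [pollsamplingLoop, not_lt.mpr h]

lemma pvPop?_last (l : List Int) (h : l.length ≠ 0) :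
    PySem.List.pop? l = some (pvLast l, l.dropLast) := by
  simp only [PySem.List.pop?, PySem.List.pyIdx?]
  have h1 : ¬ (0 ≤ (-1 : Int)) := by norm_num
  have h2 : -(l.length : Int) ≤ -1 := by
    have : 1 ≤ l.length := Nat.one_le_iff_ne_zero.mpr h
    omega
  simp only [if_neg h1, if_pos h2, Option.bind_some]
  have hlt : l.length - 1 < l.length := by omega
  simp only [show ((-(-1 : Int)).toNat) = 1 by rfl]
  rw [List.getElem?_eq_getElem hlt]
  simp only [Option.map_some, List.eraseIdx_length_sub_one]
  have : l[l.length - 1] = pvLast l := by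
    simp [pvLast, List.getElem?_eq_getElem hlt]
  rw [this]

lemma pvDict_getD (items : List (Int × List Int)) (i : Nat) (h : i < items.length)
    (hnd : (items.map Prod.fst).Nodup) :
    (PySem.Dict.mk items).getD items[i].1 [] = items[i].2 := by
  apply PySem.Dict.getD_of_mem_items
  · have : items[i] ∈ items := List.getElem_mem h
    simpa using this
  · simpa [PySem.Dict.keys] using hnd

lemma pvOverwrite_eq_set : ∀ (items : List (Int × List Int)) (i : Nat) (h : i < items.length)
    (w : List Int), (items.map Prod.fst).Nodup →
    items.map (fun p => if p.1 == (items[i]'h).1 then ((items[i]'h).1, w) else p)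
      = items.set i ((items[i]'h).1, w) := by
  intro items
  induction items with
  | nil => intro i h w _; simp at h
  | cons q rest ih =>
    intro i h w hnd
    have hq : q.1 ∉ rest.map Prod.fst := (List.nodup_cons.mp (by simpa using hnd)).1
    cases i with
    | zero =>
      simp only [List.getElem_cons_zero, List.set_cons_zero, List.map_cons]
      have hhead : (if q.1 == q.1 then (q.1, w) else q) = (q.1, w) := by simp
      rw [hhead]
      congr 1
      have htail : rest.map (fun p => if p.1 == q.1 then (q.1, w) else p) = rest.map id :=
        List.map_congr_left (by
          intro p hp
          have hpq : p.1 ≠ q.1 := fun he => hq (he ▸ List.mem_map_of_mem hp)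
          simp [hpq])
      simpa using htail
    | succ i =>
      have hi : i < rest.length := by simpa using h
      have hnd' : (rest.map Prod.fst).Nodup := (List.nodup_cons.mp (by simpa using hnd)).2
      simp only [List.getElem_cons_succ, List.set_cons_succ, List.map_cons]
      have hqr : q.1 ≠ (rest[i]'hi).1 :=
        fun he => hq (he ▸ List.mem_map_of_mem (List.getElem_mem hi))
      have hhead : (if q.1 == (rest[i]'hi).1 then ((rest[i]'hi).1, w) else q) = q := by
        simp [hqr]
      rw [hhead, ih i hi w hnd']

lemma pvDict_insert (items : List (Int × List Int)) (i : Nat) (h : i < items.length)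
    (hnd : (items.map Prod.fst).Nodup) (w : List Int) :
    (PySem.Dict.mk items).insert items[i].1 w = PySem.Dict.mk (items.set i (items[i].1, w)) := by
  have hc : (PySem.Dict.mk items).contains items[i].1 = true := by
    rw [PySem.Dict.contains_mk]
    exact List.any_eq_true.mpr ⟨items[i], List.getElem_mem h, by simp⟩
  unfold PySem.Dict.insert
  rw [if_pos hc]
  congr 1
  exact pvOverwrite_eq_set items i h w hnd

lemma pvFst_set (items : List (Int × List Int)) (i : Nat) (h : i < items.length) (w : List Int) :
    (items.set i (items[i].1, w)).map Prod.fst = items.map Prod.fst := by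
  rw [List.map_set]
  have h' : i < (items.map Prod.fst).length := by simpa using h
  have : (items[i].1) = (items.map Prod.fst)[i]'h' := by simp
  rw [this, List.set_getElem_self]

-- one iteration of A's while-loop, with the dict bookkeeping discharged
lemma pvStep (n : Int) (ks : List Int) (f : Nat) (items : List (Int × List Int)) (out : List Int)
    (count i : Nat) (hi : i < items.length) (hcnt : count % items.length = i)
    (hks : ks = items.map Prod.fst) (hnd : (items.map Prod.fst).Nodup) :
    pollsamplingLoop n ks (f + 1) (PySem.Dict.mk items) out count =
      if (out.length : Int) < n then
        (if items[i].2.length = 0 then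
          pollsamplingLoop n ks f (PySem.Dict.mk items) out (count + 1)
        else
          pollsamplingLoop n ks f (PySem.Dict.mk (items.set i (items[i].1, items[i].2.dropLast)))
            (out ++ [pvLast items[i].2]) (count + 1))
      else out := by
  have hne : items ≠ [] := by
    intro hE
    subst hE
    simp at hi
  have hkL : ks.length = items.length := by rw [hks, List.length_map]
  have hkE : ks.isEmpty = false := by
    rw [List.isEmpty_eq_false_iff, hks]
    simpa using hne
  by_cases hlt : (out.length : Int) < n
  · rw [if_pos hlt]
    have hkey : ks.getD (count % ks.length) 0 = items[i].1 := by
      rw [hkL, hcnt, hks, List.getD_eq_getElem _ _ (by simpa using hi), List.getElem_map]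
    simp only [pollsamplingLoop, if_pos hlt, hkE, Bool.false_eq_true, if_false, hkey,
      pvDict_getD items i hi hnd]
    by_cases hl : items[i].2.length = 0
    · rw [if_pos hl, if_neg (by simpa using hl)]
    · rw [if_neg hl, if_pos hl, pvPop?_last _ hl]
      dsimp only
      rw [pvDict_insert items i hi hnd]
  · rw [if_neg hlt, pvLoop_of_ge _ _ _ _ _ _ (le_of_not_gt hlt)]

-- one full round of A's loop, from key position items.length - j to the end of the key list
lemma pvRound (n : Int) (ks : List Int) :
    ∀ (j : Nat) (items : List (Int × List Int)) (out : List Int) (count fuel : Nat),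
    ks = items.map Prod.fst →
    (items.map Prod.fst).Nodup →
    1 ≤ j → j ≤ items.length →
    count % items.length = items.length - j →
    j ≤ fuel →
    pollsamplingLoop n ks fuel (PySem.Dict.mk items) out count =
      (if n ≤ (out.length : Int) + ((pvPicksV ((items.drop (items.length - j)).map Prod.snd)).length : Int) then
        out ++ (pvPicksV ((items.drop (items.length - j)).map Prod.snd)).take (n - out.length).toNat
      else pollsamplingLoop n ks (fuel - j)
            (PySem.Dict.mk (items.take (items.length - j) ++ (items.drop (items.length - j)).map (fun p => (p.1, p.2.dropLast))))
            (out ++ pvPicksV ((items.drop (items.length - j)).map Prod.snd)) (count + j)) := by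
  intro j
  induction j with
  | zero =>
    intro items out count fuel hks hnd h1
    omega
  | succ j ih =>
    intro items out count fuel hks hnd _ hjK hcnt hfuel
    have hiK : items.length - (j + 1) < items.length := by omega
    set i := items.length - (j + 1) with hi
    obtain ⟨f, rfl⟩ : ∃ f, fuel = f + 1 := ⟨fuel - 1, by omega⟩
    have hdrop : items.drop i = items[i] :: items.drop (i + 1) := (List.getElem_cons_drop hiK).symm
    by_cases hlt : (out.length : Int) < n
    · rw [pvStep n ks f items out count i hiK hcnt hks hnd, if_pos hlt]
      by_cases hl : items[i].2.length = 0
      · -- cluster at position i is empty: A skips it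
        rw [if_pos hl]
        have hempty : items[i].2 = [] := List.length_eq_zero_iff.mp hl
        have hpicks : pvPicksV ((items.drop i).map Prod.snd)
            = pvPicksV ((items.drop (i + 1)).map Prod.snd) := by
          rw [hdrop]
          simp [pvPicksV, List.filterMap_cons, hempty]
        have hpop : (items.drop i).map (fun p => (p.1, p.2.dropLast))
            = items[i] :: (items.drop (i + 1)).map (fun p => (p.1, p.2.dropLast)) := by
          rw [hdrop, List.map_cons]
          congr 1
          refine Prod.ext_iff.mpr ⟨rfl, ?_⟩
          simp [hempty]
        have htake : items.take (i + 1) = items.take i ++ [items[i]] := by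
          rw [List.take_succ, List.getElem?_eq_getElem hiK]
          rfl
        rcases Nat.eq_zero_or_pos j with hj0 | hjpos
        · -- last position of the round
          subst hj0
          have hdrop1 : items.drop (i + 1) = [] := by
            apply List.drop_eq_nil_of_le
            omega
          rw [hpicks, hdrop1]
          simp only [List.map_nil, pvPicksV, List.filterMap_nil, List.length_nil, Nat.cast_zero,
            add_zero, List.append_nil]
          rw [if_neg (by omega), hpop, hdrop1]
          simp only [List.map_nil]
          have : items.take i ++ [items[i]] = items := by
            rw [← htake]
            apply List.take_of_length_le
            omega
          rw [this]
          rfl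
        · -- continue the round at position i + 1 via the induction hypothesis
          have hcnt' : (count + 1) % items.length = items.length - j := by
            have hK2 : 2 ≤ items.length := by omega
            have e1 : (count + 1) % items.length = (count % items.length + 1 % items.length) % items.length :=
              Nat.add_mod count 1 items.length
            have e2 : 1 % items.length = 1 := Nat.mod_eq_of_lt (by omega)
            rw [e1, e2, hcnt, Nat.mod_eq_of_lt (show items.length - (j + 1) + 1 < items.length by omega)]
            omega
          have := ih items out (count + 1) f hks hnd hjpos (by omega) hcnt' (by omega)
          rw [this]
          have hij : items.length - j = i + 1 := by omega
          rw [hij, hpicks, hpop, htake]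
          have hfe : f - j = f + 1 - (j + 1) := by omega
          have hce : count + 1 + j = count + (j + 1) := by omega
          rw [hfe, hce, List.append_assoc]
          rfl
      · -- cluster at position i is nonempty: A pops its last element
        rw [if_neg hl]
        set x := pvLast items[i].2 with hx
        set items' := items.set i (items[i].1, items[i].2.dropLast) with hitems'
        have hlen' : items'.length = items.length := by simp [hitems']
        have hfst' : items'.map Prod.fst = items.map Prod.fst := pvFst_set items i hiK _
        have hdrop' : items'.drop (i + 1) = items.drop (i + 1) := by
          rw [hitems', List.drop_set]
          simp
        have hpicks : pvPicksV ((items.drop i).map Prod.snd)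
            = x :: pvPicksV ((items.drop (i + 1)).map Prod.snd) := by
          rw [hdrop]
          have hne2 : items[i].2 ≠ [] := by
            intro hE
            exact hl (by simp [hE])
          simp [pvPicksV, List.filterMap_cons, hne2, hx]
        have htake' : items'.take (i + 1) = items.take i ++ [(items[i].1, items[i].2.dropLast)] := by
          rw [hitems', List.set_eq_take_cons_drop _ hiK, List.take_append, List.take_take]
          have hlt' : (items.take i).length = i := by rw [List.length_take]; omega
          rw [hlt', show min (i + 1) i = i from by omega, show i + 1 - i = 1 from by omega]
          simp
        have hpop : (items.drop i).map (fun p => (p.1, p.2.dropLast))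
            = (items[i].1, items[i].2.dropLast) :: (items.drop (i + 1)).map (fun p => (p.1, p.2.dropLast)) := by
          rw [hdrop]
          rfl
        rcases Nat.eq_zero_or_pos j with hj0 | hjpos
        · -- last position of the round
          subst hj0
          have hdrop1 : items.drop (i + 1) = [] := by
            apply List.drop_eq_nil_of_le
            omega
          rw [hpicks, hdrop1]
          simp only [List.map_nil, pvPicksV, List.filterMap_nil, List.length_cons, List.length_nil]
          by_cases hq : n ≤ (out.length : Int) + ((0 : Nat) + 1 : Nat)
          · rw [if_pos (by omega)]
            have hout : n ≤ ((out ++ [x]).length : Int) := by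
              simp only [List.length_append, List.length_cons, List.length_nil]
              push_cast at hq ⊢
              omega
            rw [pvLoop_of_ge _ _ _ _ _ _ hout]
            have hn1 : (n - (out.length : Int)).toNat = 1 := by omega
            rw [hn1]
            rfl
          · rw [if_neg (by omega)]
            have hitemsE : items' = items.take i ++ [(items[i].1, items[i].2.dropLast)] := by
              rw [← htake']
              exact (List.take_of_length_le (by omega)).symm
            rw [hpop, hdrop1]
            simp only [List.map_nil]
            rw [← hitemsE]
            rfl
        · -- continue the round at position i + 1 via the induction hypothesis
          have hcnt' : (count + 1) % items'.length = items'.length - j := by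
            rw [hlen']
            have hK2 : 2 ≤ items.length := by omega
            have e1 : (count + 1) % items.length = (count % items.length + 1 % items.length) % items.length :=
              Nat.add_mod count 1 items.length
            have e2 : 1 % items.length = 1 := Nat.mod_eq_of_lt (by omega)
            rw [e1, e2, hcnt, Nat.mod_eq_of_lt (show items.length - (j + 1) + 1 < items.length by omega)]
            omega
          have := ih items' (out ++ [x]) (count + 1) f (by rw [hks, hfst']) (by rw [hfst']; exact hnd)
            hjpos (by omega) hcnt' (by omega)
          rw [this]
          have hij : items'.length - j = i + 1 := by omega
          rw [hij, hdrop', hpicks]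
          have hlen2 : ((out ++ [x]).length : Int) = (out.length : Int) + 1 := by
            simp
          by_cases hq : n ≤ (out.length : Int) + ((pvPicksV ((items.drop (i+1)).map Prod.snd)).length + 1 : Int)
          · rw [if_pos (by simp only [List.length_append, List.length_cons, List.length_nil] at hq ⊢; push_cast at hq ⊢; omega),
               if_pos (by simp only [List.length_append, List.length_cons, List.length_nil] at hq ⊢; push_cast at hq ⊢; omega)]
            have hnt : (n - (out.length : Int)).toNat = (n - ((out ++ [x]).length : Int)).toNat + 1 := by
              rw [hlen2]; omega
            rw [hnt, List.take_succ_cons, List.append_assoc]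
            rfl
          · rw [if_neg (by simp only [List.length_append, List.length_cons, List.length_nil] at hq ⊢; push_cast at hq ⊢; omega),
               if_neg (by simp only [List.length_append, List.length_cons, List.length_nil] at hq ⊢; push_cast at hq ⊢; omega)]
            rw [htake', hpop]
            have hfe : f - j = f + 1 - (j + 1) := by omega
            have hce : count + 1 + j = count + (j + 1) := by omega
            rw [hfe, hce, List.append_assoc, List.append_assoc]
            rfl
    · rw [pvLoop_of_ge _ _ _ _ _ _ (le_of_not_gt hlt)]
      rw [if_pos (by push_cast; omega)]
      have : (n - (out.length : Int)).toNat = 0 := by omega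
      rw [this]
      simp

lemma pvMain (n : Int) (ks : List Int) :
    ∀ (tot : Nat) (items : List (Int × List Int)) (out : List Int) (count fuel : Nat),
    pvTot (items.map Prod.snd) = tot →
    ks = items.map Prod.fst →
    (items.map Prod.fst).Nodup →
    items ≠ [] →
    count % items.length = 0 →
    n - (out.length : Int) ≤ (tot : Int) →
    items.length * (n - (out.length : Int)).toNat + items.length ≤ fuel →
    pollsamplingLoop n ks fuel (PySem.Dict.mk items) out count =
      out ++ (pvRounds (items.map Prod.snd)).take (n - (out.length : Int)).toNat := by
  intro tot
  induction tot using Nat.strong_induction_on with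
  | _ tot ihs =>
    intro items out count fuel htot hks hnd hne hcnt hle hfuel
    by_cases hlt : (out.length : Int) < n
    · have hK : 1 ≤ items.length := List.length_pos_iff.mpr hne
      have htpos : pvTot (items.map Prod.snd) ≠ 0 := by
        omega
      have hplen := pvPicks_len_pos _ htpos
      have hpop := pvTot_pop (items.map Prod.snd)
      have hround := pvRound n ks items.length items out count fuel hks hnd hK (le_refl _)
        (by rw [Nat.sub_self]; exact hcnt) (by nlinarith [Nat.le_add_left items.length (items.length * (n - (out.length : Int)).toNat)])
      rw [Nat.sub_self, List.drop_zero, List.take_zero, List.nil_append] at hround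
      rw [hround]
      have hrounds : pvRounds (items.map Prod.snd)
          = pvPicksV (items.map Prod.snd) ++ pvRounds (pvPopV (items.map Prod.snd)) := by
        rw [pvRounds, dif_neg htpos]
      by_cases hq : n ≤ (out.length : Int) + ((pvPicksV (items.map Prod.snd)).length : Int)
      · rw [if_pos hq, hrounds, List.take_append]
        have : ((n - (out.length : Int)).toNat - (pvPicksV (items.map Prod.snd)).length) = 0 := by
          omega
        rw [this]
        simp
      · rw [if_neg hq]
        set picks := pvPicksV (items.map Prod.snd) with hpicks
        set items' := items.map (fun p => (p.1, p.2.dropLast)) with hitems'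
        have hsnd' : items'.map Prod.snd = pvPopV (items.map Prod.snd) := by
          rw [hitems', pvPopV, List.map_map, List.map_map]
          rfl
        have hfst' : items'.map Prod.fst = items.map Prod.fst := by
          rw [hitems', List.map_map]
          rfl
        have hlen' : items'.length = items.length := by simp [hitems']
        have htot' : pvTot (items'.map Prod.snd) = tot - picks.length := by
          rw [hsnd']
          omega
        have hne' : items' ≠ [] := by
          intro hE
          apply hne
          have hL := congrArg List.length hE
          rw [hlen'] at hL
          exact List.length_eq_zero_iff.mp (by simpa using hL)
        have hcnt' : (count + items.length) % items'.length = 0 := by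
          rw [hlen', Nat.add_mod_right]
          exact hcnt
        have houtlen : (((out ++ picks).length : Int)) = (out.length : Int) + picks.length := by
          simp
        have hneed' : n - (((out ++ picks).length : Int)) ≤ ((tot - picks.length : Nat) : Int) := by
          rw [houtlen]
          push_cast at hq ⊢
          omega
        have hmul : items.length * (n - (((out ++ picks).length : Int))).toNat + items.length
            ≤ fuel - items.length := by
          have h1 : (n - (((out ++ picks).length : Int))).toNat + 1 ≤ (n - (out.length : Int)).toNat := by
            rw [houtlen]
            omega
          have h2 : items.length * ((n - (((out ++ picks).length : Int))).toNat + 1)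
              ≤ items.length * (n - (out.length : Int)).toNat := Nat.mul_le_mul_left _ h1
          rw [Nat.mul_add, Nat.mul_one] at h2
          omega
        have hrec := ihs (tot - picks.length) (by omega) items' (out ++ picks)
          (count + items.length) (fuel - items.length) htot' (by rw [hks, hfst'])
          (by rw [hfst']; exact hnd) hne' hcnt' hneed' (by rw [hlen']; exact hmul)
        rw [hrec, hrounds, ← hsnd']
        rw [List.append_assoc]
        congr 1
        rw [houtlen]
        have hsplit : (n - (out.length : Int)).toNat
            = picks.length + (n - ((out.length : Int) + picks.length)).toNat := by
          push_cast at hq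
          omega
        rw [hsplit, List.take_append, List.take_of_length_le (Nat.le_add_right _ _),
          Nat.add_sub_cancel_left]
    · rw [pvLoop_of_ge _ _ _ _ _ _ (le_of_not_gt hlt)]
      have : (n - (out.length : Int)).toNat = 0 := by omega
      rw [this]
      simp

-- ---- B side ----

def pvPickN (r : Nat) (vals : List (List Int)) : List Int :=
  vals.filterMap (fun v => if r < v.length then some (v.getD (v.length - 1 - r) 0) else none)

lemma pvGetD_eq {α : Type} (l : List α) (i : Nat) (d : α) (h : i < l.length) :
    l.getD i d = l[i] := by
  rw [List.getD_eq_getElem?_getD, List.getElem?_eq_getElem h]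
  rfl

lemma pvPickN_zero (vals : List (List Int)) : pvPickN 0 vals = pvPicksV vals := by
  unfold pvPickN pvPicksV
  apply List.filterMap_congr
  intro v _
  by_cases h : v.length = 0
  · rw [if_neg (by omega), if_pos h]
  · rw [if_pos (by omega), if_neg h]
    rfl

lemma pvPickN_succ (r : Nat) (vals : List (List Int)) :
    pvPickN (r + 1) vals = pvPickN r (pvPopV vals) := by
  unfold pvPickN pvPopV
  rw [List.filterMap_map]
  apply List.filterMap_congr
  intro v _
  simp only [Function.comp_apply, List.length_dropLast]
  by_cases h : r + 1 < v.length
  · have h1 : r < v.length - 1 := by omega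
    have hidx : v.length - 1 - 1 - r = v.length - 1 - (r + 1) := by omega
    rw [if_pos h, if_pos h1,
        pvGetD_eq _ _ _ (show v.length - 1 - (r + 1) < v.length by omega),
        pvGetD_eq _ _ _ (show v.length - 1 - 1 - r < v.dropLast.length by
          rw [List.length_dropLast]; omega)]
    simp only [hidx, List.getElem_dropLast]
  · rw [if_neg h, if_neg (by omega)]

lemma pvFlatN (R : Nat) : ∀ (vals : List (List Int)), (∀ v ∈ vals, v.length ≤ R) →
    (List.range R).flatMap (fun r => pvPickN r vals) = pvRounds vals := by
  induction R with
  | zero =>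
    intro vals hb
    have h0 : pvTot vals = 0 := by
      unfold pvTot
      rw [List.sum_eq_zero]
      intro x hx
      obtain ⟨v, hv, rfl⟩ := List.mem_map.mp hx
      have := hb v hv
      omega
    rw [pvRounds, dif_pos h0]
    simp
  | succ R ih =>
    intro vals hb
    rw [List.range_succ_eq_map, List.flatMap_cons, List.flatMap_map]
    have hstep : (List.range R).flatMap (fun a => pvPickN a.succ vals)
        = (List.range R).flatMap (fun r => pvPickN r (pvPopV vals)) := by
      apply List.flatMap_congr
      intro r _
      exact pvPickN_succ r vals
    rw [hstep, ih (pvPopV vals) (by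
      intro v hv
      obtain ⟨u, hu, rfl⟩ := List.mem_map.mp hv
      have := hb u hu
      simp only [List.length_dropLast]
      omega)]
    rw [pvPickN_zero]
    by_cases h0 : pvTot vals = 0
    · have h0' : pvTot (pvPopV vals) = 0 := by
        have := pvTot_pop vals
        omega
      have hpe : pvPicksV vals = [] := by
        have h := pvTot_pop vals
        exact List.length_eq_zero_iff.mp (by omega)
      rw [hpe, show pvRounds (pvPopV vals) = [] from by rw [pvRounds]; simp [h0'],
          show pvRounds vals = [] from by rw [pvRounds]; simp [h0]]
      rfl
    · conv_rhs => rw [pvRounds, dif_neg h0]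

lemma pvAltEq (cluster_dict : List (Int × List Int)) (sample_nums : Int) (hn : 0 ≤ sample_nums) :
    pollsampling_alt cluster_dict sample_nums =
      (pvRounds ((PySem.Dict.ofList cluster_dict).values)).take sample_nums.toNat := by
  unfold pollsampling_alt
  set vals := (PySem.Dict.ofList cluster_dict).values with hvals
  have hmax : max sample_nums 0 = sample_nums := max_eq_left hn
  rw [hmax, PySem.List.slice_to _ hn]
  congr 1
  by_cases hv : vals = []
  · rw [hv, show pvRounds [] = [] from by rw [pvRounds]; simp [pvTot]]
    simp
  -- the comprehension equals the flatMap of pickN over Nat rounds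
  set rounds := PySem.List.maxD (vals.map (fun v => PySem.List.len v)) id 0 with hrounds
  obtain ⟨m, hmx⟩ : ∃ m, PySem.List.max? (vals.map (fun v => PySem.List.len v)) id = some m := by
    rcases hm : PySem.List.max? (vals.map (fun v => PySem.List.len v)) id with _ | m
    · exact absurd ((PySem.List.max?_eq_none_iff _ _).mp hm) (by simpa using hv)
    · exact ⟨m, rfl⟩
  obtain ⟨v0, hv0, rfl⟩ := List.mem_map.mp (PySem.List.max?_mem hmx)
  have hre : rounds = PySem.List.len v0 := by rw [hrounds, PySem.List.maxD, hmx]; rfl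
  have hr0 : 0 ≤ rounds := by rw [hre]; simp [PySem.List.len_eq]
  have hbound : ∀ v ∈ vals, v.length ≤ rounds.toNat := by
    intro v hv'
    have := PySem.List.max?_isMax hmx (PySem.List.len v) (List.mem_map_of_mem hv')
    simp only [id, PySem.List.len_eq] at this
    rw [hre]
    simp only [PySem.List.len_eq] at *
    omega
  have hcast : rounds = ((rounds.toNat : Nat) : Int) := by omega
  rw [hcast, PySem.List.pyRange_zero_natCast, List.flatMap_map]
  rw [← pvFlatN rounds.toNat vals hbound]
  apply List.flatMap_congr
  intro r _
  unfold pvPickN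
  apply List.filterMap_congr
  intro v _
  simp only [PySem.List.len_eq]
  by_cases h : r < v.length
  · rw [if_pos (by exact_mod_cast h), if_pos h]
    have he : (-1 - (r : Int)) = -((r + 1 : Nat) : Int) := by push_cast; ring
    rw [he, PySem.List.pyGet?_neg_natCast v (r + 1) (by omega) (by omega)]
    rw [List.getElem?_eq_getElem (by omega : v.length - (r + 1) < v.length)]
    rw [List.getD_eq_getElem _ _ (by omega : v.length - 1 - r < v.length)]
    congr 2
    omega
  · rw [if_neg (by exact_mod_cast h), if_neg h]

-- ===== VERDICT (by name: the statement is the Claim_ definition above) =====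
lemma pvTotCast (vals : List (List Int)) :
    ((pvTot vals : Nat) : Int) = (vals.map (fun v => (v.length : Int))).sum := by
  induction vals with
  | nil => rfl
  | cons v vs ih =>
    simp only [pvTot, List.map_cons, List.sum_cons] at ih ⊢
    push_cast at ih ⊢
    omega

theorem pollsampling_spec : Claim_equal_pollsampling := by
  unfold Claim_equal_pollsampling
  intro cd n _ hpre
  unfold Spec_pollsampling
  obtain ⟨htot, hne0⟩ := hpre
  by_cases hn : n ≤ 0
  · have hA : pollsampling cd n = [] := by
      unfold pollsampling
      exact pvLoop_of_ge _ _ _ _ _ _ (by simpa using hn)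
    have hB : pollsampling_alt cd n = [] := by
      simp only [pollsampling_alt]
      rw [PySem.List.slice_to _ (le_max_right _ _), max_eq_right hn]
      simp
    rw [hA, hB]
  · push_neg at hn
    have hcd : cd ≠ [] := hne0 hn
    have hnd : ((PySem.Dict.ofList cd).items.map Prod.fst).Nodup := by
      have h := PySem.Dict.nodup_keys_ofList (κ := Int) (ν := List Int) cd
      simpa [PySem.Dict.keys] using h
    have hkeysne : (PySem.Dict.ofList cd).keys ≠ [] := by
      obtain ⟨p, l, rfl⟩ := List.exists_cons_of_ne_nil hcd
      have hk : (PySem.Dict.ofList (p :: l)).keys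
          = PySem.Set.update (PySem.Dict.empty : PySem.Dict Int (List Int)).keys ((p :: l).map Prod.fst) :=
        PySem.Dict.keys_foldl_insert_key (p :: l) Prod.fst _ PySem.Dict.empty
      rw [hk, show (PySem.Dict.empty : PySem.Dict Int (List Int)).keys = [] from rfl,
          PySem.Set.update_nil_left]
      exact List.ne_nil_of_mem ((PySem.Set.mem_ofList _ p.1).mpr (by simp))
    have hneitems : (PySem.Dict.ofList cd).items ≠ [] := by
      intro hE
      apply hkeysne
      show ((PySem.Dict.ofList cd).items).map (fun x => x.1) = []
      rw [hE]
      rfl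
    have hkl : (PySem.Dict.ofList cd).keys.length = (PySem.Dict.ofList cd).items.length := by
      show ((PySem.Dict.ofList cd).items.map (fun x => x.1)).length = _
      rw [List.length_map]
    have hle : n - ((([] : List Int).length : Nat) : Int)
        ≤ ((pvTot ((PySem.Dict.ofList cd).items.map Prod.snd) : Nat) : Int) := by
      have hval : (PySem.Dict.ofList cd).values = (PySem.Dict.ofList cd).items.map Prod.snd := rfl
      rw [hval] at htot
      rw [pvTotCast]
      simp only [List.length_nil, Nat.cast_zero, sub_zero]
      simpa [List.map_map] using htot
    have hfuel : (PySem.Dict.ofList cd).items.length * (n - ((([] : List Int).length : Nat) : Int)).toNat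
          + (PySem.Dict.ofList cd).items.length
        ≤ ((PySem.Dict.ofList cd).keys.length + 1) * (n.toNat + 1) := by
      rw [hkl]
      have hexp : ((PySem.Dict.ofList cd).items.length + 1) * (n.toNat + 1)
          = (PySem.Dict.ofList cd).items.length * n.toNat
            + (PySem.Dict.ofList cd).items.length + n.toNat + 1 := by ring
      rw [hexp]
      simp only [List.length_nil, Nat.cast_zero, sub_zero]
      omega
    have hmain := pvMain n (PySem.Dict.ofList cd).keys (pvTot ((PySem.Dict.ofList cd).items.map Prod.snd))
      (PySem.Dict.ofList cd).items [] 0 (((PySem.Dict.ofList cd).keys.length + 1) * (n.toNat + 1))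
      rfl rfl hnd hneitems (Nat.zero_mod _) hle hfuel
    have hmk : PySem.Dict.mk (PySem.Dict.ofList cd).items = PySem.Dict.ofList cd := rfl
    rw [hmk] at hmain
    have hA : pollsampling cd n
        = (pvRounds ((PySem.Dict.ofList cd).items.map Prod.snd)).take n.toNat := by
      show pollsamplingLoop n (PySem.Dict.ofList cd).keys
          (((PySem.Dict.ofList cd).keys.length + 1) * (n.toNat + 1)) (PySem.Dict.ofList cd) [] 0 = _
      rw [hmain]
      simp
    rw [hA, pvAltEq cd n (le_of_lt hn)]
    rfl
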